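-- pv_equiv track=rewrite | github.com/precice/systemtests | common.py | filter_for_most_specialized_tests
-- ===== SOURCE A (Python) =====
-- def determine_test_name(test):
--     return test.split('.')[0]
--
-- def determine_specialization(test):
--     """
--     The specialization degree of a test is simply determined, by counting the number of appended specializations.
--     Example:
--     test_bindings has specialization degree 1
--     test_bindings.Ubuntu1804 has specialization degree 2
--     """
--     return len(test.split('.'))
--
-- def filter_for_most_specialized_tests(all_tests):
--     """
--     We only want to consider the most specialized test, if several tests are availabe. This function removes duplicate tests and filters for the most specialized version.
--     """
--     most_specialized_tests = {}
--     for test in all_tests: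
--         test_name = determine_test_name(test)
--         specialization_degree = determine_specialization(test)
--         if not test_name in most_specialized_tests:  # test has not been added to the dict so far
--             most_specialized_tests[test_name] = test
--         elif determine_specialization(most_specialized_tests[test_name]) < specialization_degree:  # test has already been added to the dict, but the currently evaluated test is more specialized
--             most_specialized_tests[test_name] = test
--     return most_specialized_tests
-- ===== SOURCE B (Python) =====
-- def determine_test_name(test):
--     return test.split('.')[0]
--
-- def determine_specialization(test):
--     return len(test.split('.'))
--
-- def filter_for_most_specialized_tests(all_tests):
--     """
--     Group the tests by base name in one pass, then pick the most specialized
--     member of each group with max (first maximal element wins ties).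
--     """
--     groups = {}
--     for test in all_tests:
--         groups.setdefault(determine_test_name(test), []).append(test)
--     return {name: max(tests, key=determine_specialization)
--             for name, tests in groups.items()}
-- ===== Notes on version B (the rewrite author's own statement) =====
-- stated objective: idiomatic
-- what changed: A interleaves grouping and maximum-tracking in one dict of running bests; B first builds a name->group table in one pass, then picks max(tests, key=determine_specialization) per group (first maximal element, matching A's first-max-wins and first-appearance key order).
import Mathlib
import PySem

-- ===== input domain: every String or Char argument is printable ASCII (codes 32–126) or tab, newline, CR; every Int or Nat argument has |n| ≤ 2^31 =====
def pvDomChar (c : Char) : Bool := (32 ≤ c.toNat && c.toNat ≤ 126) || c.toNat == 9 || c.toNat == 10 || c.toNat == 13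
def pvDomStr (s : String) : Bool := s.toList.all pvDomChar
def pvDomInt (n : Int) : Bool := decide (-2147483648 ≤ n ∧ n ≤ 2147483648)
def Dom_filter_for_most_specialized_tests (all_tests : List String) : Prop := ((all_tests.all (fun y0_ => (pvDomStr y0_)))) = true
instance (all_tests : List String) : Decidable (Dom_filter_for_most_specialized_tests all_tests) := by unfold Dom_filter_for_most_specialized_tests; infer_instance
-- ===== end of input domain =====

-- B: group tests by base name first, then take the (first) maximum per group — same values, same order as A.

-- ===== PORT A =====
def determine_test_name (test : String) : String :=
  ((PySem.Str.split? test ".").getD []).headD ""   -- sep "." is nonempty so split? is `some`; split('.') is never empty, so [0] is its head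

def determine_specialization (test : String) : Int :=
  (((PySem.Str.split? test ".").getD []).length : Int)

def filter_for_most_specialized_tests (all_tests : List String) : List (String × String) :=
  (all_tests.foldl
    (fun most_specialized_tests test =>
      let test_name := determine_test_name test
      let specialization_degree := determine_specialization test
      if (most_specialized_tests.contains test_name) = false then
        most_specialized_tests.insert test_name test
      else if determine_specialization (most_specialized_tests.getD test_name "") < specialization_degree then
        most_specialized_tests.insert test_name test
      else most_specialized_tests)
    PySem.Dict.empty).items

-- ===== PORT B =====
def filter_for_most_specialized_tests_alt (all_tests : List String) : List (String × String) :=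
  let groups := all_tests.foldl
    (fun g test => g.modify (determine_test_name test) [] (fun ts => ts ++ [test]))
    PySem.Dict.empty
  groups.items.map (fun p => (p.1, (PySem.List.max? p.2 determine_specialization).getD ""))

-- ===== PRECONDITION & SPEC =====
def Spec_filter_for_most_specialized_tests (all_tests : List String) (out : List (String × String)) : Prop := out = filter_for_most_specialized_tests_alt all_tests
instance (all_tests : List String) (out : List (String × String)) : Decidable (Spec_filter_for_most_specialized_tests all_tests out) := by unfold Spec_filter_for_most_specialized_tests; infer_instance

-- ===== CLAIM (what is proved, stated in full; the proofs are below) =====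
def Claim_equal_filter_for_most_specialized_tests : Prop := ∀ (all_tests : List String), Dom_filter_for_most_specialized_tests all_tests → Spec_filter_for_most_specialized_tests all_tests (filter_for_most_specialized_tests all_tests)

-- ===== LEMMAS AND PROOFS =====

-- first maximal element of a group, and the item map relating B's groups dict to A's bests dict
def fmax (ts : List String) : String :=
  (PySem.List.max? ts determine_specialization).getD ""

def fpair (p : String × List String) : String × String := (p.1, fmax p.2)

lemma max?_append_some {l : List String} {t m : String}
    (hx : PySem.List.max? l determine_specialization = some m) :
    PySem.List.max? (l ++ [t]) determine_specialization =
      if determine_specialization m < determine_specialization t then some t else some m := by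
  simp only [PySem.List.max?] at hx ⊢
  rw [List.foldl_append, hx]
  simp [List.foldl]

lemma contains_of_items_map (dA : PySem.Dict String String) (dG : PySem.Dict String (List String))
    (h : dA.items = dG.items.map fpair) (k : String) :
    dA.contains k = dG.contains k := by
  simp [PySem.Dict.contains, h, List.any_map, Function.comp_def, fpair]

lemma get?_of_items_map (dA : PySem.Dict String String) (dG : PySem.Dict String (List String))
    (h : dA.items = dG.items.map fpair) (k : String) :
    dA.get? k = (dG.get? k).map fmax := by
  simp [PySem.Dict.get?, h, List.find?_map, Function.comp_def, fpair, Option.map_map]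

lemma step_items (dA : PySem.Dict String String) (dG : PySem.Dict String (List String))
    (hnd : dG.keys.Nodup) (hne : ∀ p ∈ dG.items, p.2 ≠ []) (h : dA.items = dG.items.map fpair)
    (test : String) :
    (if (dA.contains (determine_test_name test)) = false then dA.insert (determine_test_name test) test
     else if determine_specialization (dA.getD (determine_test_name test) "") < determine_specialization test then
       dA.insert (determine_test_name test) test
     else dA).items
    = (dG.modify (determine_test_name test) [] (fun ts => ts ++ [test])).items.map fpair := by
  set n := determine_test_name test with hn
  have hc := contains_of_items_map dA dG h n
  by_cases hG : dG.contains n = true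
  · -- key already present
    obtain ⟨v, hv⟩ : ∃ v, dG.get? n = some v := by
      rcases hx : dG.get? n with _ | v
      · rw [PySem.Dict.contains_eq_isSome_get?, hx] at hG; simp at hG
      · exact ⟨v, rfl⟩
    have hvne : v ≠ [] := hne (n, v) (PySem.Dict.mem_items_of_get?_eq_some dG hv)
    have hAget : dA.getD n "" = fmax v := by
      simp [PySem.Dict.getD, get?_of_items_map dA dG h n, hv]
    have hGget : dG.getD n [] = v := by simp [PySem.Dict.getD, hv]
    obtain ⟨m, hm⟩ : ∃ m, PySem.List.max? v determine_specialization = some m := by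
      rcases hx : PySem.List.max? v determine_specialization with _ | m
      · rw [PySem.List.max?_eq_none_iff] at hx; exact absurd hx hvne
      · exact ⟨m, rfl⟩
    have hfm : fmax v = m := by simp [fmax, hm]
    have hmem : ∀ p ∈ dG.items, p.1 = n → p.2 = v := by
      intro p hp hp1
      have := PySem.Dict.getD_of_mem_items (d := dG) (k := p.1) (v := p.2) hp hnd []
      rw [hp1, hGget] at this; exact this.symm
    have hGitems : (dG.modify n [] (fun ts => ts ++ [test])).items
        = dG.items.map (fun p => if (p.1 == n) = true then (n, v ++ [test]) else p) := by
      simp only [PySem.Dict.modify, hGget]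
      exact PySem.Dict.items_insert_of_contains dG _ hG
    have hfm_app : fmax (v ++ [test])
        = if determine_specialization m < determine_specialization test then test else m := by
      simp only [fmax, max?_append_some hm]
      split <;> simp
    simp only [hc, hG, hAget, hfm]
    by_cases hlt : determine_specialization m < determine_specialization test
    · -- A replaces, B's group max becomes test
      simp only [hlt, if_true, if_false, Bool.true_eq_false]
      rw [PySem.Dict.items_insert_of_contains dA test (by rw [hc]; exact hG), h, hGitems,
        List.map_map, List.map_map]
      refine List.map_congr_left ?_
      intro p hp
      by_cases hp1 : p.1 = n
      · simp [Function.comp, fpair, hp1, hfm_app, hlt]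
      · simp [Function.comp, fpair, hp1]
    · -- A keeps its entry, B's group max is unchanged
      simp only [hlt, if_false, Bool.true_eq_false]
      rw [h, hGitems, List.map_map]
      refine List.map_congr_left ?_
      intro p hp
      by_cases hp1 : p.1 = n
      · have hpv := hmem p hp hp1
        simp [Function.comp, fpair, hp1, hfm_app, hlt, hpv, hfm]
      · simp [Function.comp, fpair, hp1]
  · -- fresh key: both append
    have hG' : dG.contains n = false := by simpa using hG
    have hGget : dG.getD n [] = [] := PySem.Dict.getD_of_not_contains dG [] hG'
    have hA' : dA.contains n = false := by rw [hc]; exact hG'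
    simp only [hA', if_true]
    rw [PySem.Dict.items_insert_of_not_contains dA test hA', h]
    simp only [PySem.Dict.modify, hGget, List.nil_append]
    rw [PySem.Dict.items_insert_of_not_contains dG [test] hG', List.map_append]
    simp [fpair, fmax, PySem.List.max?]

lemma inv (l : List String) :
    ∀ (dA : PySem.Dict String String) (dG : PySem.Dict String (List String)),
      dG.keys.Nodup → (∀ p ∈ dG.items, p.2 ≠ []) → dA.items = dG.items.map fpair →
      (l.foldl
        (fun most_specialized_tests test =>
          let test_name := determine_test_name test
          let specialization_degree := determine_specialization test
          if (most_specialized_tests.contains test_name) = false then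
            most_specialized_tests.insert test_name test
          else if determine_specialization (most_specialized_tests.getD test_name "") < specialization_degree then
            most_specialized_tests.insert test_name test
          else most_specialized_tests)
        dA).items
      = (l.foldl (fun g test => g.modify (determine_test_name test) [] (fun ts => ts ++ [test])) dG).items.map fpair := by
  induction l with
  | nil => intro dA dG _ _ h; simpa using h
  | cons t l ih =>
    intro dA dG hnd hne h
    simp only [List.foldl_cons]
    apply ih
    · exact PySem.Dict.nodup_keys_insert dG _ _ hnd
    · intro p hp
      rcases (PySem.Dict.mem_items_insert _ _ _ _).mp hp with hp | ⟨hp, _⟩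
      · subst hp; simp
      · exact hne p hp
    · exact step_items dA dG hnd hne h t

-- ===== VERDICT (by name: the statement is the Claim_ definition above) =====
theorem filter_for_most_specialized_tests_spec : Claim_equal_filter_for_most_specialized_tests := by
  intro all_tests _
  show _ = _
  unfold filter_for_most_specialized_tests filter_for_most_specialized_tests_alt
  have := inv all_tests PySem.Dict.empty PySem.Dict.empty
    (by simp [PySem.Dict.keys, PySem.Dict.empty])
    (by simp [PySem.Dict.empty])
    (by simp [PySem.Dict.empty])
  simpa [fpair, fmax] using this
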